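-- pv_equiv track=rewrite | github.com/iaudouard/animerecommender | logic.py | stop_doubles_in_ranking
-- ===== SOURCE A (Python) =====
-- def stop_doubles_in_ranking(animes, new_name):
--
-- 	new_name = new_name.split(" ")
-- 	for x in animes:
-- 		stripped_name = x.split(" ")
-- 		if new_name[0] in stripped_name:
-- 			return False
-- 		if len(new_name) >= 2 and new_name[1] in stripped_name:
-- 			return False
--
-- 	return True
-- ===== SOURCE B (Python) =====
-- def stop_doubles_in_ranking(animes, new_name):
--     all_words = set()
--     for x in animes:
--         all_words.update(x.split(" "))
--     words = new_name.split(" ")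
--     return not (words[0] in all_words
--                 or (len(words) >= 2 and words[1] in all_words))
-- ===== Notes on version B (the rewrite author's own statement) =====
-- stated objective: idiomatic
-- what changed: Replaces the per-anime membership loop with early exit by one pass that flattens all ranking words into a single set, followed by a constant number of set lookups for the first (and second, if present) word of new_name.
import Mathlib
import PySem

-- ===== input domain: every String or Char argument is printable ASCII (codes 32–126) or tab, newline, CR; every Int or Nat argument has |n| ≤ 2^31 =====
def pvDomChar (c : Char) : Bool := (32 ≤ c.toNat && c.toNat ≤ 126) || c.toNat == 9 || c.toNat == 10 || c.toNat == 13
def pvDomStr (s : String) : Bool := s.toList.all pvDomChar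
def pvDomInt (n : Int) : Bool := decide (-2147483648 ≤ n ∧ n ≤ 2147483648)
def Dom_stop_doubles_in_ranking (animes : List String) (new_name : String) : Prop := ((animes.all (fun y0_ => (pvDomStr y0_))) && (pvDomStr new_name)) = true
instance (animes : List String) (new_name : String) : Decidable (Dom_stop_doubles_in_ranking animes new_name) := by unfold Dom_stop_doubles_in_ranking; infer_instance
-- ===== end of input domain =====

-- B replaces A's per-anime membership loop (with early exit) by building one set of all
-- ranking words and doing two lookups; idiomatic, same behaviour.

-- ===== PORT A =====
-- the for-loop with early returns, as structural recursion over animes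
def stop_doubles_loop (nn : List String) : List String → Bool
  | [] => true
  | x :: rest =>
    let stripped_name := (PySem.Str.split? x " ").getD []
    if stripped_name.contains (PySem.List.pyGetD nn 0 "") then false
    else if decide (2 ≤ nn.length) && stripped_name.contains (PySem.List.pyGetD nn 1 "") then false
    else stop_doubles_loop nn rest

def stop_doubles_in_ranking (animes : List String) (new_name : String) : Bool :=
  stop_doubles_loop ((PySem.Str.split? new_name " ").getD []) animes

-- ===== PORT B =====
def stop_doubles_in_ranking_alt (animes : List String) (new_name : String) : Bool :=
  let all_words := animes.foldl (fun s x => PySem.Set.update s ((PySem.Str.split? x " ").getD [])) PySem.Set.empty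
  let words := (PySem.Str.split? new_name " ").getD []
  !(PySem.Set.contains all_words (PySem.List.pyGetD words 0 "")
    || (decide (2 ≤ words.length) && PySem.Set.contains all_words (PySem.List.pyGetD words 1 "")))

-- ===== PRECONDITION & SPEC =====
def Spec_stop_doubles_in_ranking (animes : List String) (new_name : String) (out : Bool) : Prop := out = stop_doubles_in_ranking_alt animes new_name
instance (animes : List String) (new_name : String) (out : Bool) : Decidable (Spec_stop_doubles_in_ranking animes new_name out) := by unfold Spec_stop_doubles_in_ranking; infer_instance

-- ===== CLAIM (what is proved, stated in full; the proofs are below) =====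
def Claim_equal_stop_doubles_in_ranking : Prop := ∀ (animes : List String) (new_name : String), Dom_stop_doubles_in_ranking animes new_name → Spec_stop_doubles_in_ranking animes new_name (stop_doubles_in_ranking animes new_name)

-- ===== LEMMAS AND PROOFS =====

-- distributing List.any over ||
theorem any_distrib_or {α : Type} (l : List α) (p q : α → Bool) :
    (l.any fun x => p x || q x) = (l.any p || l.any q) := by
  induction l with
  | nil => rfl
  | cons a t ih => simp only [List.any_cons, ih]; cases p a <;> cases q a <;> simp

-- A's loop returns true iff no anime's word list hits w0 (or w1 when nn has >= 2 words)
theorem stop_doubles_loop_eq_any (nn : List String) (l : List String) :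
    stop_doubles_loop nn l =
      !(l.any (fun x =>
        ((PySem.Str.split? x " ").getD []).contains (PySem.List.pyGetD nn 0 "")
        || (decide (2 ≤ nn.length) && ((PySem.Str.split? x " ").getD []).contains (PySem.List.pyGetD nn 1 "")))) := by
  induction l with
  | nil => rfl
  | cons x rest ih =>
    simp only [stop_doubles_loop, List.any_cons]
    split_ifs with h1 h2
    · simp only [h1, Bool.true_or, Bool.not_true]
    · have e1 : ((PySem.Str.split? x " ").getD []).contains (PySem.List.pyGetD nn 0 "") = false := by
        simpa using h1
      simp only [e1, Bool.false_or, h2, Bool.true_or, Bool.not_true]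
    · have e1 : ((PySem.Str.split? x " ").getD []).contains (PySem.List.pyGetD nn 0 "") = false := by
        simpa using h1
      have e2 : (decide (2 ≤ nn.length) && ((PySem.Str.split? x " ").getD []).contains (PySem.List.pyGetD nn 1 "")) = false := by
        simpa using h2
      simp only [e1, e2, Bool.false_or, ih]

-- membership in the accumulated word set
theorem contains_foldl_update (l : List String) (s : PySem.Set String) (w : String) :
    (l.foldl (fun s x => PySem.Set.update s ((PySem.Str.split? x " ").getD [])) s).contains w =
      (s.contains w || l.any (fun x => ((PySem.Str.split? x " ").getD []).contains w)) := by
  induction l generalizing s with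
  | nil => simp
  | cons x rest ih =>
    simp only [List.foldl_cons, List.any_cons, ih]
    have : (PySem.Set.update s ((PySem.Str.split? x " ").getD [])).contains w =
        (s.contains w || ((PySem.Str.split? x " ").getD []).contains w) := by
      simp only [PySem.Set.contains_eq_listContains, List.contains_eq_mem]
      by_cases h : w ∈ PySem.Set.update s ((PySem.Str.split? x " ").getD [])
      · have h' := h; rw [PySem.Set.mem_update] at h'
        rcases h' with h' | h' <;> simp [h, h']
      · have h' := h; rw [PySem.Set.mem_update] at h'; push Not at h'
        simp [h, h'.1, h'.2]
    rw [this, Bool.or_assoc]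

-- ===== VERDICT (by name: the statement is the Claim_ definition above) =====
theorem stop_doubles_in_ranking_spec : Claim_equal_stop_doubles_in_ranking := by
  intro animes new_name _
  unfold Spec_stop_doubles_in_ranking stop_doubles_in_ranking stop_doubles_in_ranking_alt
  have hemp : ∀ w : String, (PySem.Set.empty : PySem.Set String).contains w = false := fun _ => rfl
  simp only [stop_doubles_loop_eq_any, contains_foldl_update, hemp, Bool.false_or]
  by_cases h2 : 2 ≤ ((PySem.Str.split? new_name " ").getD []).length
  · simp only [h2, decide_true, Bool.true_and, any_distrib_or, Bool.not_or]
  · simp only [h2, decide_false, Bool.false_and, Bool.or_false]
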